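-- pv_equiv track=rewrite | github.com/SurajKir/Demo | Zmei Gorynich.py | damage
-- ===== SOURCE A (Python) =====
-- def damage(n_x, g_dmg, i_h):
--     tf = []
--     for i in g_dmg:
--         if(i<=0):
--             tf.append(False)
--         else:
--             tf.append(True)
--     if(any(tf)):
--         return -1
--     else:
--         h = i_h
--         count = 0
--         while(h>0):
--             i = g_dmg.index(max(g_dmg))
--             h = h-n_x[i][0]+n_x[i][1]
--             count += 1
--         return count
-- ===== SOURCE B (Python) =====
-- def damage(n_x, g_dmg, i_h):
--     if any(d > 0 for d in g_dmg):
--         return -1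
--     if i_h <= 0:
--         return 0
--     i = g_dmg.index(max(g_dmg))
--     step = n_x[i][0] - n_x[i][1]
--     return -(-i_h // step)
-- ===== Notes on version B (the rewrite author's own statement) =====
-- stated objective: alternative
-- what changed: B replaces A's while-loop that subtracts the fixed per-step damage from the health one iteration at a time by a single closed-form ceiling division ceil(i_h/step).
import Mathlib
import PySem

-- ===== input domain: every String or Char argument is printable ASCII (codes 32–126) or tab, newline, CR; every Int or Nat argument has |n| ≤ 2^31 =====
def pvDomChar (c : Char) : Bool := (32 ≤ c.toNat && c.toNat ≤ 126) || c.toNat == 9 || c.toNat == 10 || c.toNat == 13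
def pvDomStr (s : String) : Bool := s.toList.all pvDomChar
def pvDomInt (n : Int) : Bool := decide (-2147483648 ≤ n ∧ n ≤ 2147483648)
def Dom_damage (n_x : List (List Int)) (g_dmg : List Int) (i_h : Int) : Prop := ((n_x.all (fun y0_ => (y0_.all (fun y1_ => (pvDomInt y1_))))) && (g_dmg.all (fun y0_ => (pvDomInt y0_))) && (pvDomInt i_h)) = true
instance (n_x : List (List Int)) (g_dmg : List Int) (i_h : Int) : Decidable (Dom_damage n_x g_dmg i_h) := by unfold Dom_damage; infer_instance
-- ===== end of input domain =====

-- B replaces A's one-hit-at-a-time while-loop by a single closed-form ceiling division.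


-- ===== PORT A =====
-- Python's `while h > 0` loop, one recursion step per iteration; fuel makes it total
-- (inside Pre_damage the step is ≥ 1 so fuel = i_h.toNat never runs out; on a raising
-- index/max the Python raises, which is outside Pre_ — the `none` branches return the
-- count so far only to stay total).
def damageLoop (n_x : List (List Int)) (g_dmg : List Int) : Nat → Int → Int → Int
  | 0, _, count => count
  | fuel + 1, h, count =>
      if h > 0 then
        match PySem.List.max? g_dmg (fun x => x) with
        | none => count
        | some m =>
          match PySem.List.index? g_dmg m with
          | none => count
          | some i =>
            match PySem.List.pyGet? n_x (i : Int) with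
            | none => count
            | some row =>
              match PySem.List.pyGet? row 0, PySem.List.pyGet? row 1 with
              | some a, some b => damageLoop n_x g_dmg fuel (h - a + b) (count + 1)
              | _, _ => count
      else count

def damage (n_x : List (List Int)) (g_dmg : List Int) (i_h : Int) : Int :=
  let tf := g_dmg.foldl (fun acc i => acc ++ [if i ≤ 0 then false else true]) []
  if tf.any id then -1
  else damageLoop n_x g_dmg i_h.toNat i_h 0

-- ===== PORT B =====
def damage_alt (n_x : List (List Int)) (g_dmg : List Int) (i_h : Int) : Int :=
  if g_dmg.any (fun d => decide (0 < d)) then -1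
  else if i_h ≤ 0 then 0
  else
    match PySem.List.max? g_dmg (fun x => x) with
    | none => 0      -- Python: max([]) raises, outside Pre_
    | some m =>
      match PySem.List.index? g_dmg m with
      | none => 0
      | some i =>
        match PySem.List.pyGet? n_x (i : Int) with
        | none => 0  -- IndexError, outside Pre_
        | some row =>
          match PySem.List.pyGet? row 0, PySem.List.pyGet? row 1 with
          | some a, some b => -(PySem.Int.floordiv (-i_h) (a - b))
          | _, _ => 0

-- ===== PRECONDITION & SPEC =====
-- the per-step damage n_x[argmax g_dmg][0] - n_x[argmax g_dmg][1], none where Python would raise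
def stepOf (n_x : List (List Int)) (g_dmg : List Int) : Option Int :=
  match PySem.List.max? g_dmg (fun x => x) with
  | none => none
  | some m =>
    match PySem.List.index? g_dmg m with
    | none => none
    | some i =>
      match PySem.List.pyGet? n_x (i : Int) with
      | none => none
      | some row =>
        match PySem.List.pyGet? row 0, PySem.List.pyGet? row 1 with
        | some a, some b => some (a - b)
        | _, _ => none

-- Pre_ excludes exactly the inputs where A raises (empty g_dmg / out-of-range index with
-- i_h > 0) or loops forever (non-positive per-step damage with i_h > 0); nothing A returns
-- normally on is excluded.
def Pre_damage (n_x : List (List Int)) (g_dmg : List Int) (i_h : Int) : Prop :=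
  g_dmg.any (fun d => decide (0 < d)) = true ∨ i_h ≤ 0 ∨ 0 < (stepOf n_x g_dmg).getD 0
instance (n_x : List (List Int)) (g_dmg : List Int) (i_h : Int) : Decidable (Pre_damage n_x g_dmg i_h) := by
  unfold Pre_damage; infer_instance

def pvWitness_damage : List (List Int) × List Int × Int := ([[3, 1]], [-2], 10)

def Spec_damage (n_x : List (List Int)) (g_dmg : List Int) (i_h : Int) (out : Int) : Prop := out = damage_alt n_x g_dmg i_h
instance (n_x : List (List Int)) (g_dmg : List Int) (i_h : Int) (out : Int) : Decidable (Spec_damage n_x g_dmg i_h out) := by unfold Spec_damage; infer_instance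

-- ===== CLAIM (what is proved, stated in full; the proofs are below) =====
def Claim_equal_damage : Prop := ∀ (n_x : List (List Int)) (g_dmg : List Int) (i_h : Int), Dom_damage n_x g_dmg i_h → Pre_damage n_x g_dmg i_h → Spec_damage n_x g_dmg i_h (damage n_x g_dmg i_h)

-- ===== LEMMAS AND PROOFS =====

-- A's tf-building foldl: tf has a True iff g_dmg has a positive element
theorem tf_any (g_dmg : List Int) (init : List Bool) :
    (g_dmg.foldl (fun acc i => acc ++ [if i ≤ 0 then false else true]) init).any id
      = (init.any id || g_dmg.any (fun d => decide (0 < d))) := by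
  induction g_dmg generalizing init with
  | nil => simp
  | cons x t ih =>
      simp only [List.foldl_cons, List.any_cons, ih, List.any_append, List.any_cons,
        List.any_nil, Bool.or_false, id]
      by_cases hx : x ≤ 0
      · simp [hx, show ¬ (0 < x) by omega]
      · simp [hx, show 0 < x by omega]

-- the loop never runs when h ≤ 0
theorem damageLoop_nonpos (n_x : List (List Int)) (g_dmg : List Int)
    (fuel : Nat) (h count : Int) (hh : h ≤ 0) :
    damageLoop n_x g_dmg fuel h count = count := by
  cases fuel with
  | zero => rfl
  | succ fuel => simp [damageLoop, show ¬ h > 0 by omega]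

-- ceiling division recurrence: ⌈h/d⌉ = ⌈(h-d)/d⌉ + 1
theorem cdiv_sub (h d : Int) (hd : d ≠ 0) :
    -(PySem.Int.floordiv (-h) d) = -(PySem.Int.floordiv (-(h - d)) d) + 1 := by
  have : -(h - d) = -h + 1 * d := by ring
  rw [this]
  unfold PySem.Int.floordiv
  rw [Int.add_mul_fdiv_right _ _ hd]
  ring

-- the loop computes count + ⌈h/d⌉ when the per-step damage is a fixed d > 0
theorem damageLoop_eq (n_x : List (List Int)) (g_dmg : List Int)
    (m : Int) (i : Nat) (row : List Int) (a b : Int)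
    (hm : PySem.List.max? g_dmg (fun x => x) = some m)
    (hi : PySem.List.index? g_dmg m = some i)
    (hrow : PySem.List.pyGet? n_x (i : Int) = some row)
    (ha : PySem.List.pyGet? row 0 = some a)
    (hb : PySem.List.pyGet? row 1 = some b)
    (hd : 0 < a - b) :
    ∀ (fuel : Nat) (h count : Int), h ≤ (fuel : Int) → 0 < h →
      damageLoop n_x g_dmg fuel h count = count + -(PySem.Int.floordiv (-h) (a - b)) := by
  intro fuel
  induction fuel with
  | zero => intro h count hle hpos; omega
  | succ fuel ih =>
      intro h count hle hpos
      simp only [damageLoop, if_pos hpos, hm, hi, hrow, ha, hb]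
      by_cases hrest : 0 < h - a + b
      · rw [ih (h - a + b) (count + 1) (by push_cast at hle ⊢; omega) hrest]
        have := cdiv_sub h (a - b) (by omega)
        have hsub : h - (a - b) = h - a + b := by ring
        rw [hsub] at this
        omega
      · rw [damageLoop_nonpos _ _ _ _ _ (by omega)]
        have : -(PySem.Int.floordiv (-h) (a - b)) = 1 := by
          rw [PySem.Int.neg_floordiv_neg_eq_iff_of_pos (b := a - b) (hb := hd)]
          constructor <;> omega
        omega

-- ===== VERDICT (by name: the statement is the Claim_ definition above) =====
theorem damage_spec : Claim_equal_damage := by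
  intro n_x g_dmg i_h _ hpre
  unfold Spec_damage damage damage_alt
  rw [show ([] : List Bool) = ([] : List Bool) from rfl]
  simp only [tf_any g_dmg [], List.any_nil, Bool.false_or]
  by_cases hany : g_dmg.any (fun d => decide (0 < d)) = true
  · simp [hany]
  · simp only [hany, Bool.false_eq_true, if_false]
    by_cases hih : i_h ≤ 0
    · rw [damageLoop_nonpos _ _ _ _ _ hih, if_pos hih]
    · rw [if_neg hih]
      rcases hpre with h1 | h2 | h3
      · exact absurd h1 hany
      · omega
      · unfold stepOf at h3
        rcases hm : PySem.List.max? g_dmg (fun x => x) with _ | m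
        · simp only [hm, Option.getD_none] at h3; omega
        · rcases hi : PySem.List.index? g_dmg m with _ | i
          · simp only [hm, hi, Option.getD_none] at h3; omega
          · rcases hrow : PySem.List.pyGet? n_x (i : Int) with _ | row
            · simp only [hm, hi, hrow, Option.getD_none] at h3; omega
            · rcases ha : PySem.List.pyGet? row 0 with _ | a
              · simp only [hm, hi, hrow, ha, Option.getD_none] at h3; omega
              · rcases hb : PySem.List.pyGet? row 1 with _ | b
                · simp only [hm, hi, hrow, ha, hb, Option.getD_none] at h3; omega
                · simp only [hm, hi, hrow, ha, hb, Option.getD_some] at h3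
                  simp only [hi, hrow, ha, hb]
                  rw [show -PySem.Int.floordiv (-i_h) (a - b) = 0 + -PySem.Int.floordiv (-i_h) (a - b) by ring]
                  exact damageLoop_eq n_x g_dmg m i row a b hm hi hrow ha hb h3
                    i_h.toNat i_h 0 (by omega) (by omega)
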